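-- pv_equiv track=rewrite | github.com/sujin403/programmers | 2단계/숫자 변환하기.py | solution
-- ===== SOURCE A (Python) =====
-- from collections import deque
-- from collections import deque
-- from collections import deque
--
-- def solution(x, y, n):
--     visited = [0]*1000001
--     q = deque()
--     q.append((0,x))
--     visited[x] = 1
--     while q :
--         cnt, now = q.popleft()
--         if now == y :
--             return cnt
--         for i in (now + n,2 * now,3 * now):
--             if i <= y  and visited[i] == 0:
--                 q.append((cnt+1, i))
--                 visited[i] = 1
--
--     return -1
-- ===== SOURCE B (Python) =====
-- def solution(x, y, n):
--     # Forward DP over the value axis: dp[v-x] = fewest operations to reach v from x.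
--     if y < x:
--         return -1
--     size = y - x + 1
--     INF = size + 1
--     dp = [INF] * size
--     dp[0] = 0
--     for v in range(x, y + 1):
--         d = dp[v - x]
--         if d < INF:
--             for w in (v + n, 2 * v, 3 * v):
--                 if v < w <= y and d + 1 < dp[w - x]:
--                     dp[w - x] = d + 1
--     return dp[y - x] if dp[y - x] < INF else -1
-- ===== Notes on version B (the rewrite author's own statement) =====
-- stated objective: alternative
-- what changed: Replaces the BFS (a deque of (count,value) pairs with a preallocated million-entry visited table) by a forward dynamic program over the value axis: a cost table dp indexed by the values x..y, swept once in ascending order relaxing v+n, 2v, 3v; correct because with x,n >= 0 every move is value-nondecreasing, so shortest distances can be filled in value order with no queue at all.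
-- outside the precondition, e.g. on solution(49, 90, -11): A returns 7, B returns -1; on solution(-122, 14, 38): A returns 5, B returns -1; on solution(1000001, 5, 1): A raises IndexError, B returns -1
import Mathlib
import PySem

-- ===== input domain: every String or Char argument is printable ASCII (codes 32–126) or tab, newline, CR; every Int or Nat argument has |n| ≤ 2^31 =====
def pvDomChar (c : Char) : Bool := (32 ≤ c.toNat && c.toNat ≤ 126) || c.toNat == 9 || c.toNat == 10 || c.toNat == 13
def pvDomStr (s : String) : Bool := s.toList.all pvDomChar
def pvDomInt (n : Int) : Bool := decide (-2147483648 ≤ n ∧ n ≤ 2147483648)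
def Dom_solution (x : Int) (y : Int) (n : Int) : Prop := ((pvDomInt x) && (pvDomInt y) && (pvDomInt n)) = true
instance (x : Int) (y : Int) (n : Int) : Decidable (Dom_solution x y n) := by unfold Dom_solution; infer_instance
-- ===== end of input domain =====

set_option maxRecDepth 4000


-- B replaces A's BFS (deque of (count,value) pairs over a million-entry visited table)
-- by a forward dynamic program over the value axis: a cost table dp over x..y swept once
-- in ascending value order, relaxing v+n, 2v, 3v; same return value on Pre_.

-- ===== PORT A =====
-- One Python push: `if i <= y and visited[i] == 0: q.append((cnt+1,i)); visited[i] = 1`.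
-- pyGet?/pySetD give Python's (wrapping) index semantics; where Python raises IndexError
-- (pyGet? = none) the port skips — such inputs are outside Pre_.
def solPush (y c i : Int) (st : List (Int × Int) × List Int) : List (Int × Int) × List Int :=
  if i ≤ y ∧ PySem.List.pyGet? st.2 i = some 0 then
    (st.1 ++ [(c, i)], PySem.List.pySetD st.2 i 1)
  else st

-- `while q:` — pop left, return cnt on hit, else push the three children in tuple order.
-- The Nat argument is a fuel bound making the recursion total; it is never exhausted
-- on inputs satisfying Pre_ (the measure |q| + 2·#unvisited stays below it).
def solutionLoop (y n : Int) : Nat → List (Int × Int) → List Int → Int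
  | _, [], _ => -1
  | 0, _ :: _, _ => -1
  | fa+1, (cnt, now) :: rest, vis =>
    if now = y then cnt
    else
      let st := solPush y (cnt+1) (3*now) (solPush y (cnt+1) (2*now) (solPush y (cnt+1) (now+n) (rest, vis)))
      solutionLoop y n fa st.1 st.2

def solution (x : Int) (y : Int) (n : Int) : Int :=
  solutionLoop y n 5000000 [(0, x)]
    (PySem.List.pySetD (List.replicate 1000001 (0 : Int)) x 1)

-- ===== PORT B =====
-- One Python relaxation: `if v < w <= y and d + 1 < dp[w - x]: dp[w - x] = d + 1`.
-- The guard keeps the index w - x inside the table, where pyGetD/pySetD agree with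
-- Python's dp[w - x] exactly.
def dpRelax (x y v d w : Int) (dp : List Int) : List Int :=
  if v < w ∧ w ≤ y ∧ d + 1 < PySem.List.pyGetD dp (w - x) 0 then
    PySem.List.pySetD dp (w - x) (d + 1)
  else dp

-- The body of `for v in range(x, y+1):` — read d = dp[v-x], and if finite relax the
-- three targets in B's tuple order (d is read once in Source B; it is written inline here).
def dpStep (x y n : Int) (dp : List Int) (v : Int) : List Int :=
  if PySem.List.pyGetD dp (v - x) 0 < y - x + 2 then
    dpRelax x y v (PySem.List.pyGetD dp (v - x) 0) (3*v)
      (dpRelax x y v (PySem.List.pyGetD dp (v - x) 0) (2*v)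
        (dpRelax x y v (PySem.List.pyGetD dp (v - x) 0) (v + n) dp))
  else dp

def solution_alt (x : Int) (y : Int) (n : Int) : Int :=
  if y < x then -1
  else
    let dp := (PySem.List.pyRange x (y + 1) 1).foldl (dpStep x y n)
      (PySem.List.pySetD (List.replicate (y - x + 1).toNat (y - x + 2)) 0 0)
    if PySem.List.pyGetD dp (y - x) 0 < y - x + 2 then PySem.List.pyGetD dp (y - x) 0 else -1

-- ===== PRECONDITION & SPEC =====
-- Pre_ excludes negative x or n, where A's values depend on Python's negative-index
-- wraparound into the million-entry visited table (values reachable below x have no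
-- cell in B's table), and x or y beyond the table, where A raises IndexError on
-- visited[...] except in degenerate no-push corners.
def Pre_solution (x : Int) (y : Int) (n : Int) : Prop :=
  0 ≤ x ∧ x ≤ 1000000 ∧ y ≤ 1000000 ∧ 0 ≤ n
instance (x : Int) (y : Int) (n : Int) : Decidable (Pre_solution x y n) := by
  unfold Pre_solution; infer_instance

def pvWitness_solution : Int × Int × Int := (5, 10, 2)

def Spec_solution (x : Int) (y : Int) (n : Int) (out : Int) : Prop := out = solution_alt x y n
instance (x : Int) (y : Int) (n : Int) (out : Int) : Decidable (Spec_solution x y n out) := by unfold Spec_solution; infer_instance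

-- ===== CLAIM (what is proved, stated in full; the proofs are below) =====
def Claim_equal_solution : Prop := ∀ (x : Int) (y : Int) (n : Int), Dom_solution x y n → Pre_solution x y n → Spec_solution x y n (solution x y n)

-- ===== LEMMAS AND PROOFS =====

-- ---------- shared reachability framework ----------
-- StepR y n v w: one Python move from v to w that the BFS would push (w ≤ y).
def StepR (y n v w : Int) : Prop := (w = v + n ∨ w = 2*v ∨ w = 3*v) ∧ w ≤ y

-- Rk x y n k v: v is reachable from x in at most k pushed moves.
def Rk (x y n : Int) : Nat → Int → Prop
  | 0, v => v = x
  | k+1, w => Rk x y n k w ∨ ∃ v, Rk x y n k v ∧ StepR y n v w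

def RkLt (x y n : Int) (d : Nat) (w : Int) : Prop := ∃ k, k < d ∧ Rk x y n k w
def FirstAt (x y n : Int) (d : Nat) (w : Int) : Prop := Rk x y n d w ∧ ¬ RkLt x y n d w

-- GoodOut r: r is the value the problem specifies (first level of y, or -1).
def GoodOut (x y n r : Int) : Prop :=
  (∀ d : Nat, FirstAt x y n d y → r = (d : Int)) ∧ ((∀ k, ¬ Rk x y n k y) → r = -1)

theorem Rk_mono (x y n : Int) (k m : Nat) (v : Int) (hkm : k ≤ m) (h : Rk x y n k v) :
    Rk x y n m v := by
  induction m with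
  | zero => have : k = 0 := by omega
            subst this; exact h
  | succ m ih =>
    rcases Nat.lt_or_ge k (m+1) with hlt | hge
    · exact Or.inl (ih (by omega))
    · have : k = m + 1 := by omega
      subst this; exact h

theorem step_le (y n v w : Int) (hn : 0 ≤ n) (hv : 0 ≤ v) (h : StepR y n v w) : v ≤ w := by
  rcases h.1 with h1 | h1 | h1 <;> omega

theorem Rk_lb (x y n : Int) (hx : 0 ≤ x) (hn : 0 ≤ n) :
    ∀ (k : Nat) (v : Int), Rk x y n k v → x ≤ v := by
  intro k
  induction k with
  | zero => intro v h; simp only [Rk] at h; omega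
  | succ k ih =>
    intro w h
    rcases h with h | ⟨v, hv, hs⟩
    · exact ih w h
    · have hxv := ih v hv
      have := step_le y n v w hn (by omega) hs
      omega

theorem firstAt_unique (x y n : Int) (d d' : Nat) (w : Int)
    (h : FirstAt x y n d w) (h' : FirstAt x y n d' w) : d = d' := by
  by_contra hne
  rcases Nat.lt_or_ge d d' with hlt | hge
  · exact h'.2 ⟨d, hlt, h.1⟩
  · exact h.2 ⟨d', by omega, h'.1⟩

theorem exists_firstAt (x y n : Int) :
    ∀ (k : Nat) (w : Int), Rk x y n k w → ∃ d, d ≤ k ∧ FirstAt x y n d w := by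
  intro k
  induction k using Nat.strong_induction_on with
  | _ k ih =>
    intro w h
    by_cases hlt : RkLt x y n k w
    · obtain ⟨j, hj, hr⟩ := hlt
      obtain ⟨d, hd, hf⟩ := ih j hj w hr
      exact ⟨d, by omega, hf⟩
    · exact ⟨k, le_rfl, h, hlt⟩

theorem firstAt_pred (x y n : Int) (hx : 0 ≤ x) (hn : 0 ≤ n) (d : Nat) (w : Int)
    (h : FirstAt x y n (d+1) w) :
    ∃ u, FirstAt x y n d u ∧ StepR y n u w ∧ u < w := by
  obtain ⟨hr, hnl⟩ := h
  have hnd : ¬ Rk x y n d w := fun hd => hnl ⟨d, by omega, hd⟩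
  rcases hr with hr | ⟨v, hv, hs⟩
  · exact absurd hr hnd
  · obtain ⟨j, hj, hf⟩ := exists_firstAt x y n d v hv
    have hjd : j = d := by
      by_contra hne
      have hjlt : j < d := by omega
      have : Rk x y n (j+1) w := Or.inr ⟨v, hf.1, hs⟩
      exact hnl ⟨j+1, by omega, this⟩
    subst hjd
    have hvx : x ≤ v := Rk_lb x y n hx hn j v hf.1
    have hle : v ≤ w := step_le y n v w hn (by omega) hs
    have hne : v ≠ w := fun he => hnd (he ▸ hf.1)
    exact ⟨v, hf, hs, by omega⟩

theorem firstAt_lb (x y n : Int) (hx : 0 ≤ x) (hn : 0 ≤ n) :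
    ∀ (d : Nat) (w : Int), FirstAt x y n d w → x + d ≤ w := by
  intro d
  induction d with
  | zero => intro w h; have : w = x := h.1; omega
  | succ d ih =>
    intro w h
    obtain ⟨u, hu, _, hlt⟩ := firstAt_pred x y n hx hn d w h
    have := ih u hu
    push_cast
    omega

theorem goodOut_unique (x y n r1 r2 : Int)
    (h1 : GoodOut x y n r1) (h2 : GoodOut x y n r2) : r1 = r2 := by
  rcases Classical.em (∃ k, Rk x y n k y) with ⟨k, hk⟩ | hno
  · obtain ⟨d, _, hf⟩ := exists_firstAt x y n k y hk
    rw [h1.1 d hf, h2.1 d hf]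
  · have hno' : ∀ k, ¬ Rk x y n k y := fun k hk => hno ⟨k, hk⟩
    rw [h1.2 hno', h2.2 hno']

-- ---------- level-synchronous BFS (proof-internal bridge between A and the spec) ----------
def lvlPush (y w : Int) (st : PySem.Set Int × List Int) : PySem.Set Int × List Int :=
  if w ≤ y ∧ ¬ w ∈ st.1 then (PySem.Set.add st.1 w, st.2 ++ [w]) else st

def lvlStep (y n : Int) (st : PySem.Set Int × List Int) (v : Int) : PySem.Set Int × List Int :=
  lvlPush y (3*v) (lvlPush y (2*v) (lvlPush y (v+n) st))

def levelLoop (y n : Int) : Nat → List Int → PySem.Set Int → Int → Int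
  | _, [], _, _ => -1
  | 0, _ :: _, _, _ => -1
  | K+1, v :: f, seen, d =>
    if y ∈ v :: f then d
    else
      let st := (v :: f).foldl (lvlStep y n) (seen, [])
      levelLoop y n K st.2 st.1 (d+1)

-- A-side queue of one BFS level: the frontier values paired with their distance.
def AQ (d : Int) (f : List Int) : List (Int × Int) := f.map (fun v => (d, v))

-- The simulation invariant: the visited table and the seen set mark the same values.
def InvVS (vis : List Int) (S : PySem.Set Int) : Prop :=
  vis.length = 1000001 ∧ ∀ j : Nat, j < 1000001 → (vis.getD j 0 = 0 ↔ ¬ ((j : Int) ∈ S))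

-- Number of unmarked table cells (bounds both fuels).
def unseenN (S : PySem.Set Int) : Nat :=
  ((Finset.range 1000001).filter (fun j : Nat => ¬ ((j : Int) ∈ S))).card

theorem unseenN_le (S : PySem.Set Int) : unseenN S ≤ 1000001 := by
  have h := Finset.card_filter_le (Finset.range 1000001) (fun j : Nat => ¬ ((j : Int) ∈ S))
  simpa using h

theorem unseenN_append (w : Int) (S : PySem.Set Int) (h0 : 0 ≤ w) (h1 : w ≤ 1000000)
    (hm : w ∉ S) : unseenN (S ++ [w]) + 1 = unseenN S := by
  have hmem : w.toNat ∈ (Finset.range 1000001).filter (fun j : Nat => ¬ ((j : Int) ∈ S)) := by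
    simp only [Finset.mem_filter, Finset.mem_range]
    refine ⟨by omega, ?_⟩
    rwa [Int.toNat_of_nonneg h0]
  have hset : ((Finset.range 1000001).filter (fun j : Nat => ¬ ((j : Int) ∈ S ++ [w])))
      = ((Finset.range 1000001).filter (fun j : Nat => ¬ ((j : Int) ∈ S))).erase w.toNat := by
    ext j
    simp only [Finset.mem_filter, Finset.mem_erase, Finset.mem_range, List.mem_append,
      List.mem_singleton, not_or]
    constructor
    · rintro ⟨hj, hns, hnw⟩
      exact ⟨by omega, hj, hns⟩
    · rintro ⟨hne, hj, hns⟩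
      refine ⟨hj, hns, by omega⟩
  have hpos : 0 < ((Finset.range 1000001).filter (fun j : Nat => ¬ ((j : Int) ∈ S))).card :=
    Finset.card_pos.mpr ⟨_, hmem⟩
  unfold unseenN
  rw [hset, Finset.card_erase_of_mem hmem]
  omega

theorem sim_push (y c w : Int) (q : List (Int × Int)) (vis : List Int) (acc : List Int)
    (S : PySem.Set Int) (hInv : InvVS vis S) (hw : 0 ≤ w) (hy : y ≤ 1000000) :
    ∃ (nw : List Int) (vis₁ : List Int) (S₁ : PySem.Set Int),
      solPush y c w (q, vis) = (q ++ nw.map (fun u => (c, u)), vis₁) ∧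
      lvlPush y w (S, acc) = (S₁, acc ++ nw) ∧
      InvVS vis₁ S₁ ∧ (∀ u ∈ nw, 0 ≤ u) ∧ unseenN S₁ + nw.length = unseenN S := by
  obtain ⟨hlen, hiff⟩ := hInv
  by_cases hcy : w ≤ y
  · have hwlt : w.toNat < vis.length := by omega
    have hgd : vis.getD w.toNat 0 = vis[w.toNat] := List.getD_eq_getElem vis 0 hwlt
    have hget : PySem.List.pyGet? vis w = some vis[w.toNat] := by
      rw [PySem.List.pyGet?_of_nonneg vis hw, List.getElem?_eq_getElem hwlt]
    have hcast : ((w.toNat : Nat) : Int) = w := Int.toNat_of_nonneg hw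
    by_cases hm : w ∈ S
    · -- already marked: both sides skip
      have hne : vis[w.toNat] ≠ 0 := by
        intro h0
        have := (hiff w.toNat (by omega)).mp (by rw [hgd]; exact h0)
        rw [hcast] at this
        exact this hm
      have hcond : ¬ (w ≤ y ∧ PySem.List.pyGet? vis w = some 0) := by
        rw [hget]; rintro ⟨-, h⟩; exact hne (Option.some.inj h)
      refine ⟨[], vis, S, ?_, ?_, ⟨hlen, hiff⟩, by simp, by simp⟩
      · simp [solPush, hcond]
      · simp [lvlPush, hm]
    · -- unmarked: both sides push w
      have h0 : vis[w.toNat] = 0 := by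
        have := (hiff w.toNat (by omega)).mpr (by rw [hcast]; exact hm)
        rw [hgd] at this; exact this
      refine ⟨[w], vis.set w.toNat 1, S ++ [w], ?_, ?_, ?_, ?_, ?_⟩
      · simp only [solPush, hget, h0]
        rw [PySem.List.pySetD_of_nonneg vis (1 : Int) hw]
        simp [hcy]
      · rw [lvlPush]
        simp only [hcy, hm, not_false_iff, true_and, if_true]
        rw [PySem.Set.add_of_not_mem hm]
      · constructor
        · simp [hlen]
        · intro j hj
          by_cases hjx : j = w.toNat
          · subst hjx
            have : (vis.set w.toNat 1).getD w.toNat 0 = 1 := by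
              rw [List.getD_eq_getElem _ 0 (by simpa using hwlt), List.getElem_set_self]
            rw [this]
            simp only [List.mem_append, List.mem_singleton]
            constructor
            · intro h; exact absurd h (by norm_num)
            · intro h; exact absurd (Or.inr hcast) h
          · have : (vis.set w.toNat 1).getD j 0 = vis.getD j 0 := by
              by_cases hjl : j < vis.length
              · rw [List.getD_eq_getElem _ 0 (by simpa using hjl), List.getD_eq_getElem _ 0 hjl,
                  List.getElem_set_ne (by omega)]
              · rw [List.getD_eq_default _ 0 (by simpa using hjl),
                  List.getD_eq_default _ 0 (by omega)]
            rw [this, hiff j hj]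
            simp only [List.mem_append, List.mem_singleton]
            constructor
            · intro h hor
              rcases hor with h1 | h1
              · exact h h1
              · exact hjx (by omega)
            · intro h h1; exact h (Or.inl h1)
      · intro u hu; simp only [List.mem_singleton] at hu; omega
      · simpa using unseenN_append w S hw (by omega) hm
  · -- w > y: both sides skip
    refine ⟨[], vis, S, ?_, ?_, ⟨hlen, hiff⟩, by simp, by simp⟩
    · simp [solPush, hcy]
    · simp [lvlPush, hcy]

theorem sim_step (y c n v : Int) (q : List (Int × Int)) (vis : List Int) (acc : List Int)
    (S : PySem.Set Int) (hInv : InvVS vis S) (hv : 0 ≤ v) (hn : 0 ≤ n) (hy : y ≤ 1000000) :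
    ∃ (nw : List Int) (vis₁ : List Int) (S₁ : PySem.Set Int),
      solPush y c (3*v) (solPush y c (2*v) (solPush y c (v+n) (q, vis)))
        = (q ++ nw.map (fun u => (c, u)), vis₁) ∧
      lvlStep y n (S, acc) v = (S₁, acc ++ nw) ∧
      InvVS vis₁ S₁ ∧ (∀ u ∈ nw, 0 ≤ u) ∧ unseenN S₁ + nw.length = unseenN S := by
  obtain ⟨n1, v1, S1, hA1, hB1, hI1, hp1, hu1⟩ :=
    sim_push y c (v+n) q vis acc S hInv (by omega) hy
  obtain ⟨n2, v2, S2, hA2, hB2, hI2, hp2, hu2⟩ :=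
    sim_push y c (2*v) (q ++ n1.map (fun u => (c, u))) v1 (acc ++ n1) S1 hI1 (by omega) hy
  obtain ⟨n3, v3, S3, hA3, hB3, hI3, hp3, hu3⟩ :=
    sim_push y c (3*v) (q ++ n1.map (fun u => (c, u)) ++ n2.map (fun u => (c, u))) v2
      (acc ++ n1 ++ n2) S2 hI2 (by omega) hy
  refine ⟨n1 ++ n2 ++ n3, v3, S3, ?_, ?_, hI3, ?_, ?_⟩
  · rw [hA1, hA2, hA3]
    simp [List.map_append, List.append_assoc]
  · simp only [lvlStep]
    rw [hB1, hB2, hB3]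
    simp [List.append_assoc]
  · intro u hu
    simp only [List.mem_append] at hu
    rcases hu with (hu | hu) | hu
    · exact hp1 u hu
    · exact hp2 u hu
    · exact hp3 u hu
  · simp only [List.length_append]
    omega

theorem push1_shape (y c w : Int) (st : List (Int × Int) × List Int) :
    ∃ t vis', solPush y c w st = (st.1 ++ t, vis') := by
  unfold solPush
  split_ifs with h
  · exact ⟨[(c, w)], _, rfl⟩
  · exact ⟨[], st.2, by simp⟩

theorem push3_shape (y c n v : Int) (q : List (Int × Int)) (vis : List Int) :
    ∃ t vis', solPush y c (3*v) (solPush y c (2*v) (solPush y c (v+n) (q, vis)))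
      = (q ++ t, vis') := by
  obtain ⟨t1, w1, h1⟩ := push1_shape y c (v+n) (q, vis)
  obtain ⟨t2, w2, h2⟩ := push1_shape y c (2*v) (q ++ t1, w1)
  obtain ⟨t3, w3, h3⟩ := push1_shape y c (3*v) (q ++ t1 ++ t2, w2)
  refine ⟨t1 ++ t2 ++ t3, w3, ?_⟩
  rw [h1, h2, h3]
  simp [List.append_assoc]

theorem solutionLoop_nil (y n : Int) (fa : Nat) (vis : List Int) :
    solutionLoop y n fa [] vis = -1 := by cases fa <;> rfl

theorem levelLoop_nil (y n : Int) (K : Nat) (S : PySem.Set Int) (d : Int) :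
    levelLoop y n K [] S d = -1 := by cases K <;> rfl

theorem loop_mem_y (y n d : Int) :
    ∀ (f : List Int) (rest : List (Int × Int)) (vis : List Int) (fa : Nat),
      y ∈ f → f.length ≤ fa →
      solutionLoop y n fa (AQ d f ++ rest) vis = d := by
  intro f
  induction f with
  | nil => intro rest vis fa hmem; simp at hmem
  | cons v f' ih =>
    intro rest vis fa hmem hlen
    match fa with
    | 0 => simp at hlen
    | fa'+1 =>
      have hq : AQ d (v :: f') ++ rest = (d, v) :: (AQ d f' ++ rest) := by simp [AQ]
      rw [hq]
      by_cases hvy : v = y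
      · simp [solutionLoop, hvy]
      · have hy' : y ∈ f' := by
          rcases List.mem_cons.mp hmem with h | h
          · exact absurd h.symm hvy
          · exact h
        obtain ⟨t, vis', hst⟩ := push3_shape y (d+1) n v (AQ d f' ++ rest) vis
        simp only [solutionLoop, hvy, if_false]
        rw [hst]
        simp only [List.append_assoc]
        exact ih (rest ++ t) vis' fa' hy' (by simp at hlen ⊢; omega)

theorem main_level (y n : Int) (hn : 0 ≤ n) (hy : y ≤ 1000000) (d : Int) (K : Nat)
    (IH : ∀ (f : List Int) (vis : List Int) (S : PySem.Set Int) (fa : Nat),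
      InvVS vis S → (∀ v ∈ f, 0 ≤ v) →
      (f ≠ [] → unseenN S + 1 ≤ K) → f.length + 2 * unseenN S + 1 ≤ fa →
      solutionLoop y n fa (AQ (d+1) f) vis = levelLoop y n K f S (d+1)) :
    ∀ (f acc : List Int) (vis : List Int) (S : PySem.Set Int) (fa : Nat),
      InvVS vis S → (∀ v ∈ f, 0 ≤ v) → (∀ v ∈ acc, 0 ≤ v) → y ∉ f →
      unseenN S + acc.length + 1 ≤ K + 1 →
      f.length + acc.length + 2 * unseenN S + 1 ≤ fa →
      solutionLoop y n fa (AQ d f ++ AQ (d+1) acc) vis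
        = levelLoop y n K (f.foldl (lvlStep y n) (S, acc)).2 (f.foldl (lvlStep y n) (S, acc)).1 (d+1) := by
  intro f
  induction f with
  | nil =>
    intro acc vis S fa hInv _ hacc _ hK hfa
    simp only [AQ, List.map_nil, List.nil_append, List.foldl_nil]
    exact IH acc vis S fa hInv hacc
      (fun hne => by
        have : 1 ≤ acc.length := List.length_pos_of_ne_nil hne
        omega)
      (by omega)
  | cons v f' ih =>
    intro acc vis S fa hInv hf hacc hyf hK hfa
    have hv : 0 ≤ v := hf v (List.mem_cons_self ..)
    have hvy : v ≠ y := fun h => hyf (h ▸ List.mem_cons_self ..)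
    match fa with
    | 0 => simp at hfa
    | fa'+1 =>
      obtain ⟨nw, vis1, S1, hA, hB, hI1, hnw, hu⟩ :=
        sim_step y (d+1) n v (AQ d f' ++ AQ (d+1) acc) vis acc S hInv hv hn hy
      have hq : AQ d (v :: f') ++ AQ (d+1) acc = (d, v) :: (AQ d f' ++ AQ (d+1) acc) := by
        simp [AQ]
      rw [hq]
      simp only [solutionLoop, hvy, if_false]
      rw [hA]
      have hmapnw : nw.map (fun u => ((d:Int)+1, u)) = AQ (d+1) nw := rfl
      have hacc' : AQ d f' ++ AQ (d+1) acc ++ nw.map (fun u => ((d:Int)+1, u))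
          = AQ d f' ++ AQ (d+1) (acc ++ nw) := by
        rw [hmapnw]; simp [AQ, List.append_assoc]
      rw [hacc']
      have hfold : (v :: f').foldl (lvlStep y n) (S, acc)
          = f'.foldl (lvlStep y n) (S1, acc ++ nw) := by
        simp only [List.foldl_cons, hB]
      rw [hfold]
      exact ih (acc ++ nw) vis1 S1 fa' hI1
        (fun u hu' => hf u (List.mem_cons_of_mem _ hu'))
        (fun u hu' => by
          rcases List.mem_append.mp hu' with h | h
          · exact hacc u h
          · exact hnw u h)
        (fun h => hyf (List.mem_cons_of_mem _ h))
        (by simp only [List.length_append]; omega)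
        (by simp only [List.length_append]; simp only [List.length_cons] at hfa; omega)

theorem top_level (y n : Int) (hn : 0 ≤ n) (hy : y ≤ 1000000) :
    ∀ (K : Nat) (f : List Int) (vis : List Int) (S : PySem.Set Int) (d : Int) (fa : Nat),
      InvVS vis S → (∀ v ∈ f, 0 ≤ v) →
      (f ≠ [] → unseenN S + 1 ≤ K) → f.length + 2 * unseenN S + 1 ≤ fa →
      solutionLoop y n fa (AQ d f) vis = levelLoop y n K f S d := by
  intro K
  induction K with
  | zero =>
    intro f vis S d fa _ _ hK _
    cases f with
    | nil => simp [AQ, solutionLoop_nil, levelLoop_nil]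
    | cons v f' =>
      have := hK (by simp)
      omega
  | succ K' ihK =>
    intro f vis S d fa hInv hf hK hfa
    cases f with
    | nil => simp [AQ, solutionLoop_nil, levelLoop_nil]
    | cons v f' =>
      by_cases hy' : y ∈ v :: f'
      · have h1 : solutionLoop y n fa (AQ d (v :: f') ++ []) vis = d :=
          loop_mem_y y n d (v :: f') [] vis fa hy' (by simp at hfa ⊢; omega)
        rw [List.append_nil] at h1
        rw [h1]
        simp [levelLoop, hy']
      · have h2 : levelLoop y n (K'+1) (v :: f') S d
            = levelLoop y n K' ((v :: f').foldl (lvlStep y n) (S, [])).2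
                ((v :: f').foldl (lvlStep y n) (S, [])).1 (d+1) := by
          simp only [levelLoop, hy', if_false]
        rw [h2]
        have h3 := main_level y n hn hy d K'
          (fun f'' vis'' S'' fa'' h1 h2 h3 h4 => ihK f'' vis'' S'' (d+1) fa'' h1 h2 h3 h4)
          (v :: f') [] vis S fa hInv hf (by simp) hy'
          (by have := hK (by simp); simp; omega)
          (by simpa using hfa)
        rw [← h3]
        simp [AQ]

theorem getD_replicate_set (N j k : Nat) (hk : k < N) :
    ((List.replicate N (0 : Int)).set k 1).getD j 0 = if j = k then 1 else 0 := by
  by_cases hj : j < N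
  · rw [List.getD_eq_getElem _ _ (by simpa using hj)]
    by_cases hjk : j = k
    · subst hjk
      rw [List.getElem_set_self]
      simp
    · rw [List.getElem_set_ne (fun h => hjk h.symm), List.getElem_replicate]
      simp [hjk]
  · rw [List.getD_eq_default _ _ (by simpa using hj)]
    have : j ≠ k := by omega
    simp [this]

-- ---------- level-BFS computes the first level ----------
theorem lvl_push_char (y w : Int) (S : PySem.Set Int) (acc : List Int)
    (h0 : 0 ≤ w) (hy : y ≤ 1000000) :
    ∃ nw S', lvlPush y w (S, acc) = (S', acc ++ nw) ∧
      (∀ u, u ∈ S' ↔ (u ∈ S ∨ u ∈ nw)) ∧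
      (∀ u, u ∈ nw ↔ (¬ u ∈ S ∧ u = w ∧ w ≤ y)) ∧
      (∀ u ∈ nw, 0 ≤ u) ∧ unseenN S' + nw.length = unseenN S := by
  by_cases hc : w ≤ y ∧ ¬ w ∈ S
  · refine ⟨[w], S ++ [w], ?_, ?_, ?_, ?_, ?_⟩
    · simp only [lvlPush]
      rw [if_pos (show w ≤ y ∧ ¬ w ∈ (S, acc).1 from ⟨hc.1, hc.2⟩),
        PySem.Set.add_of_not_mem hc.2]
    · intro u; simp [List.mem_append]
    · intro u
      simp only [List.mem_singleton]
      constructor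
      · rintro rfl; exact ⟨hc.2, rfl, hc.1⟩
      · rintro ⟨-, rfl, -⟩; rfl
    · intro u hu; simp only [List.mem_singleton] at hu; omega
    · simpa using unseenN_append w S h0 (by omega) hc.2
  · refine ⟨[], S, ?_, ?_, ?_, by simp, by simp⟩
    · simp [lvlPush, hc]
    · intro u; simp
    · intro u
      simp only [List.not_mem_nil, false_iff]
      rintro ⟨hns, rfl, hwy⟩
      exact hc ⟨hwy, hns⟩

theorem lvl_fold_char (y n : Int) (hn : 0 ≤ n) (hy : y ≤ 1000000) :
    ∀ (f : List Int) (S : PySem.Set Int) (acc : List Int), (∀ v ∈ f, 0 ≤ v) →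
    ∃ nw S', f.foldl (lvlStep y n) (S, acc) = (S', acc ++ nw) ∧
      (∀ u, u ∈ S' ↔ (u ∈ S ∨ ∃ v ∈ f, StepR y n v u)) ∧
      (∀ u, u ∈ nw ↔ (¬ u ∈ S ∧ ∃ v ∈ f, StepR y n v u)) ∧
      (∀ u ∈ nw, 0 ≤ u) ∧ unseenN S' + nw.length = unseenN S := by
  intro f
  induction f with
  | nil =>
    intro S acc _
    refine ⟨[], S, by simp, ?_, ?_, by simp, by simp⟩
    · intro u; simp
    · intro u; simp
  | cons v f' ih =>
    intro S acc hf
    have hv : 0 ≤ v := hf v (List.mem_cons_self ..)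
    obtain ⟨n1, S1, h1, mS1, mn1, p1, u1⟩ := lvl_push_char y (v+n) S acc (by omega) hy
    obtain ⟨n2, S2, h2, mS2, mn2, p2, u2⟩ := lvl_push_char y (2*v) S1 (acc ++ n1) (by omega) hy
    obtain ⟨n3, S3, h3, mS3, mn3, p3, u3⟩ := lvl_push_char y (3*v) S2 (acc ++ n1 ++ n2) (by omega) hy
    obtain ⟨n4, S4, h4, mS4, mn4, p4, u4⟩ := ih S3 (acc ++ n1 ++ n2 ++ n3)
      (fun u hu => hf u (List.mem_cons_of_mem _ hu))
    have hfold : (v :: f').foldl (lvlStep y n) (S, acc)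
        = f'.foldl (lvlStep y n) (S3, acc ++ n1 ++ n2 ++ n3) := by
      simp only [List.foldl_cons, lvlStep, h1, h2, h3]
    have mS3' : ∀ u, u ∈ S3 ↔ (u ∈ S ∨ u ∈ n1 ∨ u ∈ n2 ∨ u ∈ n3) := by
      intro u
      rw [mS3, mS2, mS1]; tauto
    have stepv : ∀ u, StepR y n v u → u ∈ S3 := by
      intro u hs
      rcases hs.1 with he | he | he
      · subst he
        by_cases hm : v + n ∈ S
        · exact (mS3' _).mpr (Or.inl hm)
        · exact (mS3' _).mpr (Or.inr (Or.inl ((mn1 _).mpr ⟨hm, rfl, hs.2⟩)))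
      · subst he
        by_cases hm : 2*v ∈ S1
        · exact (mS3 _).mpr (Or.inl ((mS2 _).mpr (Or.inl hm)))
        · exact (mS3 _).mpr (Or.inl ((mS2 _).mpr (Or.inr ((mn2 _).mpr ⟨hm, rfl, hs.2⟩))))
      · subst he
        by_cases hm : 3*v ∈ S2
        · exact (mS3 _).mpr (Or.inl hm)
        · exact (mS3 _).mpr (Or.inr ((mn3 _).mpr ⟨hm, rfl, hs.2⟩))
    have hnotS : ∀ u, (u ∈ n1 ∨ u ∈ n2 ∨ u ∈ n3) → ¬ u ∈ S := by
      intro u hu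
      rcases hu with hu | hu | hu
      · exact ((mn1 _).mp hu).1
      · intro hS; exact ((mn2 _).mp hu).1 ((mS1 _).mpr (Or.inl hS))
      · intro hS; exact ((mn3 _).mp hu).1 ((mS2 _).mpr (Or.inl ((mS1 _).mpr (Or.inl hS))))
    have hstep123 : ∀ u, (u ∈ n1 ∨ u ∈ n2 ∨ u ∈ n3) → StepR y n v u := by
      intro u hu
      rcases hu with hu | hu | hu
      · obtain ⟨-, rfl, hle⟩ := (mn1 _).mp hu; exact ⟨Or.inl rfl, hle⟩
      · obtain ⟨-, rfl, hle⟩ := (mn2 _).mp hu; exact ⟨Or.inr (Or.inl rfl), hle⟩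
      · obtain ⟨-, rfl, hle⟩ := (mn3 _).mp hu; exact ⟨Or.inr (Or.inr rfl), hle⟩
    refine ⟨n1 ++ n2 ++ n3 ++ n4, S4, ?_, ?_, ?_, ?_, ?_⟩
    · rw [hfold, h4]; simp [List.append_assoc]
    · intro u
      rw [mS4, mS3']
      constructor
      · rintro ((hS | h | h | h) | ⟨v', hv', hs⟩)
        · exact Or.inl hS
        · exact Or.inr ⟨v, List.mem_cons_self .., hstep123 u (by tauto)⟩
        · exact Or.inr ⟨v, List.mem_cons_self .., hstep123 u (by tauto)⟩
        · exact Or.inr ⟨v, List.mem_cons_self .., hstep123 u (by tauto)⟩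
        · exact Or.inr ⟨v', List.mem_cons_of_mem _ hv', hs⟩
      · rintro (hS | ⟨v', hv', hs⟩)
        · exact Or.inl (Or.inl hS)
        · rcases List.mem_cons.mp hv' with rfl | hv'
          · exact Or.inl ((mS3' u).mp (stepv u hs))
          · exact Or.inr ⟨v', hv', hs⟩
    · intro u
      simp only [List.mem_append]
      constructor
      · rintro (((h | h) | h) | h)
        · exact ⟨hnotS u (by tauto), v, List.mem_cons_self .., hstep123 u (by tauto)⟩
        · exact ⟨hnotS u (by tauto), v, List.mem_cons_self .., hstep123 u (by tauto)⟩
        · exact ⟨hnotS u (by tauto), v, List.mem_cons_self .., hstep123 u (by tauto)⟩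
        · obtain ⟨hn3', v', hv', hs⟩ := (mn4 _).mp h
          have : ¬ u ∈ S := fun hS => hn3' ((mS3' u).mpr (Or.inl hS))
          exact ⟨this, v', List.mem_cons_of_mem _ hv', hs⟩
      · rintro ⟨hns, v', hv', hs⟩
        rcases List.mem_cons.mp hv' with rfl | hv'
        · have := (mS3' u).mp (stepv u hs)
          tauto
        · by_cases h3m : u ∈ S3
          · have := (mS3' u).mp h3m
            tauto
          · exact Or.inr ((mn4 _).mpr ⟨h3m, v', hv', hs⟩)
    · intro u hu
      simp only [List.mem_append] at hu
      rcases hu with ((h | h) | h) | h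
      · exact p1 u h
      · exact p2 u h
      · exact p3 u h
      · exact p4 u h
    · simp only [List.length_append]
      omega

theorem rk_stable (x y n : Int) (D' : Nat)
    (hcol : ∀ v, Rk x y n (D'+1) v ↔ Rk x y n D' v) :
    ∀ (j : Nat) (v : Int), Rk x y n (D'+j) v → Rk x y n D' v := by
  intro j
  induction j with
  | zero => intro v h; exact h
  | succ j ih =>
    intro v h
    rcases h with h | ⟨u, hu, hs⟩
    · exact ih v h
    · exact (hcol v).mp (Or.inr ⟨u, ih u hu, hs⟩)

theorem level_empty (x y n : Int) (D : Nat)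
    (memf : ∀ v : Int, ¬ FirstAt x y n D v)
    (hny : ¬ RkLt x y n D y) :
    ∀ k, ¬ Rk x y n k y := by
  match D with
  | 0 => exact absurd ⟨rfl, fun ⟨k, hk, _⟩ => by omega⟩ (memf x)
  | D'+1 =>
    have hcol : ∀ v, Rk x y n (D'+1) v ↔ Rk x y n D' v := by
      intro v
      constructor
      · intro h
        by_cases hlt : RkLt x y n (D'+1) v
        · obtain ⟨k, hk, hr⟩ := hlt
          exact Rk_mono x y n k D' v (by omega) hr
        · exact absurd ⟨h, hlt⟩ (memf v)
      · intro h; exact Or.inl h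
    intro k hr
    rcases Nat.lt_or_ge k (D'+1) with hk | hk
    · exact hny ⟨k, hk, hr⟩
    · have : Rk x y n (D' + (k - D')) y := by
        have : D' + (k - D') = k := by omega
        rwa [this]
      have := rk_stable x y n D' hcol (k - D') y this
      exact hny ⟨D', by omega, this⟩

theorem level_correct (x y n : Int) (hx : 0 ≤ x) (hn : 0 ≤ n) (hy : y ≤ 1000000) :
    ∀ (K : Nat) (f : List Int) (S : PySem.Set Int) (D : Nat),
      (∀ v, v ∈ S ↔ Rk x y n D v) →
      (∀ v, v ∈ f ↔ FirstAt x y n D v) →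
      ¬ RkLt x y n D y →
      (f ≠ [] → unseenN S + 1 ≤ K) →
      GoodOut x y n (levelLoop y n K f S (D : Int)) := by
  intro K
  induction K with
  | zero =>
    intro f S D memS memf hny hfuel
    cases f with
    | nil =>
      rw [levelLoop_nil]
      have hempty : ∀ v : Int, ¬ FirstAt x y n D v := by
        intro v hv; exact (List.not_mem_nil).elim ((memf v).mpr hv)
      have := level_empty x y n D hempty hny
      exact ⟨fun d hd => absurd hd.1 (this d), fun _ => rfl⟩
    | cons v f' =>
      have := hfuel (by simp)
      omega
  | succ K' ih =>
    intro f S D memS memf hny hfuel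
    cases f with
    | nil =>
      rw [levelLoop_nil]
      have hempty : ∀ v : Int, ¬ FirstAt x y n D v := by
        intro v hv; exact (List.not_mem_nil).elim ((memf v).mpr hv)
      have := level_empty x y n D hempty hny
      exact ⟨fun d hd => absurd hd.1 (this d), fun _ => rfl⟩
    | cons v f' =>
      have hfpos : ∀ u ∈ v :: f', 0 ≤ u := by
        intro u hu
        have := Rk_lb x y n hx hn D u ((memf u).mp hu).1
        omega
      by_cases hyf : y ∈ v :: f'
      · simp only [levelLoop, hyf, if_true]
        have hfy : FirstAt x y n D y := (memf y).mp hyf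
        refine ⟨fun d hd => ?_, fun hno => absurd hfy.1 (hno D)⟩
        rw [firstAt_unique x y n D d y hfy hd]
      · simp only [levelLoop, hyf, if_false]
        obtain ⟨nw, S', hfold, mS', mnw, pnw, unw⟩ :=
          lvl_fold_char y n hn hy (v :: f') S [] hfpos
        rw [hfold]
        simp only [List.nil_append]
        have hcast : (D : Int) + 1 = ((D + 1 : Nat) : Int) := by push_cast; ring
        rw [hcast]
        -- the j = D argument: a (D+1)-step predecessor can be taken in the frontier
        have claim1 : ∀ u, ¬ u ∈ S → (∃ v0, Rk x y n D v0 ∧ StepR y n v0 u) →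
            ∃ v0 ∈ v :: f', StepR y n v0 u := by
          rintro u hnS ⟨v0, hr, hs⟩
          obtain ⟨j, hj, hf0⟩ := exists_firstAt x y n D v0 hr
          by_cases hjD : j = D
          · subst hjD
            exact ⟨v0, (memf v0).mpr hf0, hs⟩
          · have : Rk x y n (j+1) u := Or.inr ⟨v0, hf0.1, hs⟩
            have : Rk x y n D u := Rk_mono x y n (j+1) D u (by omega) this
            exact absurd ((memS u).mpr this) hnS
        apply ih nw S' (D+1)
        · intro u
          rw [mS' u]
          constructor
          · rintro (hS | ⟨v0, hv0, hs⟩)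
            · exact Or.inl ((memS u).mp hS)
            · exact Or.inr ⟨v0, ((memf v0).mp hv0).1, hs⟩
          · rintro (h | ⟨v0, hr, hs⟩)
            · exact Or.inl ((memS u).mpr h)
            · by_cases hS : u ∈ S
              · exact Or.inl hS
              · exact Or.inr (claim1 u hS ⟨v0, hr, hs⟩)
        · intro u
          rw [mnw u]
          constructor
          · rintro ⟨hnS, v0, hv0, hs⟩
            refine ⟨Or.inr ⟨v0, ((memf v0).mp hv0).1, hs⟩, ?_⟩
            rintro ⟨k, hk, hr⟩
            exact hnS ((memS u).mpr (Rk_mono x y n k D u (by omega) hr))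
          · rintro ⟨hr, hnl⟩
            have hnS : ¬ u ∈ S := by
              intro hS
              exact hnl ⟨D, by omega, (memS u).mp hS⟩
            rcases hr with hr | ⟨v0, hr0, hs⟩
            · exact absurd ((memS u).mpr hr) hnS
            · exact ⟨hnS, claim1 u hnS ⟨v0, hr0, hs⟩⟩
        · rintro ⟨k, hk, hr⟩
          rcases Nat.lt_or_ge k D with hkD | hkD
          · exact hny ⟨k, hkD, hr⟩
          · have hkeq : k = D := by omega
            subst hkeq
            by_cases hlt : RkLt x y n k y
            · exact hny hlt
            · exact hyf ((memf y).mpr ⟨hr, hlt⟩)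
        · intro hne
          have h1 : 1 ≤ nw.length := List.length_pos_of_ne_nil hne
          have h2 := hfuel (by simp)
          omega

theorem A_good (x y n : Int) (hx : 0 ≤ x) (hx1 : x ≤ 1000000) (hy : y ≤ 1000000)
    (hn : 0 ≤ n) : GoodOut x y n (solution x y n) := by
  have hxlt : x.toNat < 1000001 := by omega
  have hInv0 : InvVS (PySem.List.pySetD (List.replicate 1000001 (0 : Int)) x 1)
      (PySem.Set.ofList [x]) := by
    rw [PySem.List.pySetD_of_nonneg (List.replicate 1000001 (0 : Int)) (1 : Int) hx]
    refine ⟨by rw [List.length_set, List.length_replicate], ?_⟩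
    intro j hj
    rw [getD_replicate_set 1000001 j x.toNat hxlt]
    have hmem : ((j : Int) ∈ PySem.Set.ofList [x]) ↔ (j : Int) = x := by
      rw [PySem.Set.mem_ofList]; simp
    rw [hmem]
    by_cases hjx : j = x.toNat
    · rw [if_pos hjx]
      constructor
      · intro h; norm_num at h
      · intro h; exact absurd (by omega : (j : Int) = x) h
    · rw [if_neg hjx]
      constructor
      · intro _ h; exact hjx (by omega)
      · intro _; rfl
  have hub := unseenN_le (PySem.Set.ofList [x])
  have htop := top_level y n hn hy 1000002 [x]
    (PySem.List.pySetD (List.replicate 1000001 (0 : Int)) x 1) (PySem.Set.ofList [x]) 0 5000000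
    hInv0 (by intro v hv; simp at hv; omega)
    (fun _ => by omega) (by simp; omega)
  have hsol : solution x y n = levelLoop y n 1000002 [x] (PySem.Set.ofList [x]) 0 := by
    rw [← htop]; rfl
  rw [hsol]
  have h0 : (0 : Int) = ((0 : Nat) : Int) := rfl
  rw [h0]
  apply level_correct x y n hx hn hy 1000002 [x] (PySem.Set.ofList [x]) 0
  · intro u
    rw [PySem.Set.mem_ofList]
    simp only [List.mem_singleton]
    exact Iff.rfl
  · intro u
    simp only [List.mem_singleton]
    constructor
    · rintro rfl
      exact ⟨rfl, fun ⟨k, hk, _⟩ => by omega⟩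
    · rintro ⟨h, -⟩
      exact h
  · rintro ⟨k, hk, -⟩
    omega
  · intro _
    omega

-- ---------- the DP sweep computes the first level ----------
-- dpA dp w = the table cell of value w (only read for x ≤ w ≤ y).
def dpA (x : Int) (dp : List Int) (w : Int) : Int := PySem.List.pyGetD dp (w - x) 0

-- The sweep invariant before processing value v.
def Idp (x y n v : Int) (dp : List Int) : Prop :=
  dp.length = (y - x + 1).toNat ∧
  dpA x dp x = 0 ∧
  (∀ w, x ≤ w → w ≤ y → 0 ≤ dpA x dp w ∧ dpA x dp w ≤ y - x + 2) ∧
  (∀ w, x ≤ w → w ≤ y → dpA x dp w < y - x + 2 → ∃ d : Nat, dpA x dp w = (d : Int) ∧ Rk x y n d w) ∧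
  (∀ w, x ≤ w → w < v → ∀ d : Nat, FirstAt x y n d w → dpA x dp w = (d : Int)) ∧
  (∀ u w, x ≤ u → u < v → StepR y n u w → u < w → w ≤ y → dpA x dp u < y - x + 2 →
    dpA x dp w ≤ dpA x dp u + 1)

theorem dpA_pySetD (x y t val w : Int) (dp : List Int) (hlen : dp.length = (y - x + 1).toNat)
    (ht1 : x ≤ t) (ht2 : t ≤ y) (hw1 : x ≤ w) (hw2 : w ≤ y) :
    dpA x (PySem.List.pySetD dp (t - x) val) w = if w = t then val else dpA x dp w := by
  have hc : t - x = (((t - x).toNat : Nat) : Int) := by omega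
  have hcw : w - x = (((w - x).toNat : Nat) : Int) := by omega
  unfold dpA
  rw [hc, hcw, PySem.List.pyGetD_pySetD_natCast dp (t - x).toNat (w - x).toNat val 0 (by omega)]
  by_cases hwt : w = t
  · rw [if_pos (by omega), if_pos hwt]
  · rw [if_neg (by omega), if_neg hwt]

theorem dpRelax_length (x y v d w : Int) (dp : List Int) :
    (dpRelax x y v d w dp).length = dp.length := by
  unfold dpRelax
  split_ifs with h
  · rw [PySem.List.length_pySetD]
  · rfl

-- One relaxation either leaves a cell alone or writes d+1 into its own target cell.
theorem dpRelax_cases (x y v d w u : Int) (dp : List Int)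
    (hlen : dp.length = (y - x + 1).toNat) (hv : x ≤ v) (hu1 : x ≤ u) (hu2 : u ≤ y) :
    dpA x (dpRelax x y v d w dp) u = dpA x dp u ∨
      (u = w ∧ v < w ∧ w ≤ y ∧ dpA x (dpRelax x y v d w dp) u = d + 1 ∧
        d + 1 < dpA x dp u) := by
  unfold dpRelax
  split_ifs with h
  · obtain ⟨h1, h2, h3⟩ := h
    rw [dpA_pySetD x y w (d+1) u dp hlen (by omega) h2 hu1 hu2]
    by_cases hwu : u = w
    · subst hwu
      rw [if_pos rfl]
      exact Or.inr ⟨rfl, h1, h2, rfl, h3⟩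
    · rw [if_neg hwu]
      exact Or.inl rfl
  · exact Or.inl rfl

theorem dpRelax_le (x y v d w u : Int) (dp : List Int)
    (hlen : dp.length = (y - x + 1).toNat) (hv : x ≤ v) (hu1 : x ≤ u) (hu2 : u ≤ y) :
    dpA x (dpRelax x y v d w dp) u ≤ dpA x dp u := by
  rcases dpRelax_cases x y v d w u dp hlen hv hu1 hu2 with h | ⟨-, -, -, h4, h5⟩
  · omega
  · omega

theorem dpRelax_target (x y v d w : Int) (dp : List Int)
    (hlen : dp.length = (y - x + 1).toNat) (hv : x ≤ v) (hw1 : v < w) (hw2 : w ≤ y) :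
    dpA x (dpRelax x y v d w dp) w ≤ d + 1 := by
  unfold dpRelax
  split_ifs with h
  · rw [dpA_pySetD x y w (d+1) w dp hlen (by omega) hw2 (by omega) hw2, if_pos rfl]
  · have : ¬ (d + 1 < dpA x dp w) := fun hc => h ⟨hw1, hw2, hc⟩
    omega

theorem dpRelax_untouched (x y v d w u : Int) (dp : List Int)
    (hlen : dp.length = (y - x + 1).toNat) (hv : x ≤ v) (hu1 : x ≤ u) (hu2 : u ≤ y)
    (hu : u ≤ v) :
    dpA x (dpRelax x y v d w dp) u = dpA x dp u := by
  rcases dpRelax_cases x y v d w u dp hlen hv hu1 hu2 with h | ⟨h1, h2, -, -, -⟩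
  · exact h
  · omega

theorem dp_step (x y n v : Int) (dp : List Int) (hx : 0 ≤ x) (hn : 0 ≤ n)
    (hv1 : x ≤ v) (hv2 : v ≤ y) (hI : Idp x y n v dp) :
    Idp x y n (v+1) (dpStep x y n dp v) := by
  obtain ⟨hlen, hbase, hrng, hsound, hfin, hrel⟩ := hI
  by_cases hd : dpA x dp v < y - x + 2
  · -- d0 finite: the three relaxations run
    obtain ⟨dnat, hdv, hrk⟩ := hsound v hv1 hv2 hd
    have hd' : PySem.List.pyGetD dp (v - x) 0 < y - x + 2 := hd
    have hstep : dpStep x y n dp v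
        = dpRelax x y v (dpA x dp v) (3*v)
            (dpRelax x y v (dpA x dp v) (2*v)
              (dpRelax x y v (dpA x dp v) (v + n) dp)) := by
      unfold dpStep
      rw [if_pos hd']
      rfl
    rw [hstep]
    set d0 := dpA x dp v with hd0
    set dp1 := dpRelax x y v d0 (v + n) dp with hdp1
    set dp2 := dpRelax x y v d0 (2*v) dp1 with hdp2
    set dp3 := dpRelax x y v d0 (3*v) dp2 with hdp3
    have hlen1 : dp1.length = (y - x + 1).toNat := by rw [hdp1, dpRelax_length, hlen]
    have hlen2 : dp2.length = (y - x + 1).toNat := by rw [hdp2, dpRelax_length, hlen1]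
    have hlen3 : dp3.length = (y - x + 1).toNat := by rw [hdp3, dpRelax_length, hlen2]
    have hle3 : ∀ u, x ≤ u → u ≤ y → dpA x dp3 u ≤ dpA x dp u := by
      intro u hu1 hu2
      have l1 := dpRelax_le x y v d0 (v+n) u dp hlen hv1 hu1 hu2
      have l2 := dpRelax_le x y v d0 (2*v) u dp1 hlen1 hv1 hu1 hu2
      have l3 := dpRelax_le x y v d0 (3*v) u dp2 hlen2 hv1 hu1 hu2
      rw [← hdp1] at l1; rw [← hdp2] at l2; rw [← hdp3] at l3
      omega
    have huntouched : ∀ u, x ≤ u → u ≤ y → u ≤ v → dpA x dp3 u = dpA x dp u := by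
      intro u hu1 hu2 hu
      have l1 := dpRelax_untouched x y v d0 (v+n) u dp hlen hv1 hu1 hu2 hu
      have l2 := dpRelax_untouched x y v d0 (2*v) u dp1 hlen1 hv1 hu1 hu2 hu
      have l3 := dpRelax_untouched x y v d0 (3*v) u dp2 hlen2 hv1 hu1 hu2 hu
      rw [← hdp1] at l1; rw [← hdp2] at l2; rw [← hdp3] at l3
      omega
    -- every cell is either untouched or holds d0+1 after a legitimate move from v
    have hcases : ∀ u, x ≤ u → u ≤ y → dpA x dp3 u = dpA x dp u ∨
        (StepR y n v u ∧ v < u ∧ dpA x dp3 u = d0 + 1) := by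
      intro u hu1 hu2
      rcases dpRelax_cases x y v d0 (3*v) u dp2 hlen2 hv1 hu1 hu2 with h3 | ⟨he, hlt, hley, hval, -⟩
      · rw [← hdp3] at h3
        rcases dpRelax_cases x y v d0 (2*v) u dp1 hlen1 hv1 hu1 hu2 with h2 | ⟨he, hlt, hley, hval, -⟩
        · rw [← hdp2] at h2
          rcases dpRelax_cases x y v d0 (v+n) u dp hlen hv1 hu1 hu2 with h1 | ⟨he, hlt, hley, hval, -⟩
          · rw [← hdp1] at h1
            exact Or.inl (by omega)
          · rw [← hdp1] at hval
            exact Or.inr ⟨⟨Or.inl he, by omega⟩, by omega, by omega⟩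
        · rw [← hdp2] at hval
          exact Or.inr ⟨⟨Or.inr (Or.inl he), by omega⟩, by omega, by omega⟩
      · rw [← hdp3] at hval
        exact Or.inr ⟨⟨Or.inr (Or.inr he), by omega⟩, by omega, by omega⟩
    have hxy : x ≤ y := by omega
    refine ⟨hlen3, ?_, ?_, ?_, ?_, ?_⟩
    · rw [huntouched x (le_refl x) hxy hv1]
      exact hbase
    · intro w hw1 hw2
      rcases hcases w hw1 hw2 with h | ⟨-, -, h⟩
      · have := hrng w hw1 hw2; omega
      · have := hrng v hv1 hv2; omega
    · intro w hw1 hw2 hwf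
      rcases hcases w hw1 hw2 with h | ⟨hs, -, h⟩
      · rw [h] at hwf ⊢
        exact hsound w hw1 hw2 hwf
      · refine ⟨dnat + 1, ?_, Or.inr ⟨v, hrk, hs⟩⟩
        rw [h, hdv]
        push_cast
        ring
    · intro w hw1 hw2 d hf
      rcases (by omega : w < v ∨ w = v) with h | h
      · rw [huntouched w hw1 (by omega) (by omega)]
        exact hfin w hw1 h d hf
      · subst h
        rw [huntouched w hw1 hv2 le_rfl, ← hd0]
        match d, hf with
        | 0, hf =>
          have hvx : w = x := hf.1
          have hb : d0 = 0 := by rw [hd0, hvx]; exact hbase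
          rw [hb]; rfl
        | d'+1, hf =>
          obtain ⟨u, hu, hs, hult⟩ := firstAt_pred x y n hx hn d' w hf
          have hux : x ≤ u := Rk_lb x y n hx hn d' u hu.1
          have hdu : dpA x dp u = (d' : Int) := hfin u hux hult d' hu
          have hdlb := firstAt_lb x y n hx hn d' u hu
          have hduf : dpA x dp u < y - x + 2 := by omega
          have hrelv := hrel u w hux hult hs hult hv2 hduf
          have hnlt : (d' + 1 : Nat) ≤ dnat := by
            by_contra hlt
            exact hf.2 ⟨dnat, by omega, hrk⟩
          have hlink : d0 = dpA x dp w := hd0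
          omega
    · intro u w hu1 hu2 hs hlt hwy hfin'
      have hwx : x ≤ w := by omega
      rcases (by omega : u < v ∨ u = v) with h | h
      · have huy : u ≤ y := by omega
        have hu3 : dpA x dp3 u = dpA x dp u := huntouched u hu1 huy (by omega)
        rw [hu3] at hfin' ⊢
        have h1 := hrel u w hu1 h hs hlt hwy hfin'
        have h2 := hle3 w hwx hwy
        omega
      · subst h
        rw [huntouched u hu1 hv2 le_rfl, ← hd0]
        rcases hs.1 with he | he | he
        · subst he
          have t1 := dpRelax_target x y u d0 (u+n) dp hlen hv1 (by omega) hwy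
          rw [← hdp1] at t1
          have l2 := dpRelax_le x y u d0 (2*u) (u+n) dp1 hlen1 hv1 (by omega) hwy
          have l3 := dpRelax_le x y u d0 (3*u) (u+n) dp2 hlen2 hv1 (by omega) hwy
          rw [← hdp2] at l2; rw [← hdp3] at l3
          omega
        · subst he
          have t2 := dpRelax_target x y u d0 (2*u) dp1 hlen1 hv1 (by omega) hwy
          rw [← hdp2] at t2
          have l3 := dpRelax_le x y u d0 (3*u) (2*u) dp2 hlen2 hv1 (by omega) hwy
          rw [← hdp3] at l3
          omega
        · subst he
          have t3 := dpRelax_target x y u d0 (3*u) dp2 hlen2 hv1 (by omega) hwy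
          rw [← hdp3] at t3
          omega
  · -- d0 = INF: nothing runs; show the new obligations are vacuous
    have hd' : ¬ PySem.List.pyGetD dp (v - x) 0 < y - x + 2 := hd
    have hstep : dpStep x y n dp v = dp := by
      unfold dpStep
      rw [if_neg hd']
    rw [hstep]
    have hnofirst : ∀ d : Nat, ¬ FirstAt x y n d v := by
      intro d hf
      match d, hf with
      | 0, hf =>
        have hvx : v = x := hf.1
        have hb : dpA x dp v = 0 := by rw [hvx]; exact hbase
        omega
      | d'+1, hf =>
        obtain ⟨u, hu, hs, hult⟩ := firstAt_pred x y n hx hn d' v hf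
        have hux : x ≤ u := Rk_lb x y n hx hn d' u hu.1
        have hdu : dpA x dp u = (d' : Int) := hfin u hux hult d' hu
        have hdlb := firstAt_lb x y n hx hn d' u hu
        have hduf : dpA x dp u < y - x + 2 := by omega
        have := hrel u v hux hult hs hult hv2 hduf
        omega
    refine ⟨hlen, hbase, hrng, hsound, ?_, ?_⟩
    · intro w hw1 hw2 d hf
      rcases (by omega : w < v ∨ v ≤ w) with h | h
      · exact hfin w hw1 h d hf
      · have hwv : w = v := by omega
        subst hwv
        exact absurd hf (hnofirst d)
    · intro u w hu1 hu2 hs hlt hwy hfin'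
      rcases (by omega : u < v ∨ v ≤ u) with h | h
      · exact hrel u w hu1 h hs hlt hwy hfin'
      · have huv : u = v := by omega
        subst huv
        omega

theorem dp_sweep (x y n : Int) (hx : 0 ≤ x) (hn : 0 ≤ n) :
    ∀ (m : Nat) (v : Int) (dp : List Int), (y + 1 - v).toNat = m → x ≤ v →
      Idp x y n v dp →
      Idp x y n (y+1) ((PySem.List.pyRange v (y+1) 1).foldl (dpStep x y n) dp) := by
  intro m
  induction m with
  | zero =>
    intro v dp hm hxv hI
    rw [PySem.List.pyRange_one_eq_nil (by omega)]
    simp only [List.foldl_nil]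
    obtain ⟨h1, h2, h3, h4, h5, h6⟩ := hI
    exact ⟨h1, h2, h3, h4,
      fun w hw1 hw2 d hf => h5 w hw1 (by omega) d hf,
      fun u w hu1 hu2 hs hlt hwy hf => h6 u w hu1 (by omega) hs hlt hwy hf⟩
  | succ m ih =>
    intro v dp hm hxv hI
    rw [PySem.List.pyRange_one_cons (by omega), List.foldl_cons]
    exact ih (v+1) (dpStep x y n dp v) (by omega) (by omega)
      (dp_step x y n v dp hx hn hxv (by omega) hI)

theorem getD_set_replicate (N j : Nat) (a : Int) (hj : j < N) :
    ((List.replicate N a).set 0 0).getD j 0 = if j = 0 then 0 else a := by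
  rw [List.getD_eq_getElem _ _ (by simpa using hj)]
  by_cases h0 : j = 0
  · subst h0
    rw [List.getElem_set_self]
    simp
  · rw [List.getElem_set_ne (fun h => h0 h.symm), List.getElem_replicate]
    simp [h0]

theorem B_good (x y n : Int) (hx : 0 ≤ x) (hn : 0 ≤ n) :
    GoodOut x y n (solution_alt x y n) := by
  by_cases hyx : y < x
  · have hval : solution_alt x y n = -1 := by
      unfold solution_alt
      rw [if_pos hyx]
    rw [hval]
    refine ⟨fun d hd => ?_, fun _ => rfl⟩
    have := Rk_lb x y n hx hn d y hd.1
    omega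
  · have hxy : x ≤ y := by omega
    have hdp0' : PySem.List.pySetD (List.replicate (y - x + 1).toNat (y - x + 2)) 0 0
        = (List.replicate (y - x + 1).toNat (y - x + 2)).set 0 0 := by
      rw [PySem.List.pySetD_of_nonneg (List.replicate (y - x + 1).toNat (y - x + 2)) (0 : Int)
        (by omega)]
      rfl
    have hlen0 : (PySem.List.pySetD (List.replicate (y - x + 1).toNat (y - x + 2)) 0 0).length
        = (y - x + 1).toNat := by
      rw [hdp0', List.length_set, List.length_replicate]
    have hcell : ∀ w, x ≤ w → w ≤ y →
        dpA x (PySem.List.pySetD (List.replicate (y - x + 1).toNat (y - x + 2)) 0 0) w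
          = if w = x then 0 else y - x + 2 := by
      intro w hw1 hw2
      unfold dpA
      rw [show w - x = (((w - x).toNat : Nat) : Int) by omega, PySem.List.pyGetD_natCast,
        hdp0', getD_set_replicate _ _ _ (by omega)]
      by_cases hwx : w = x
      · rw [if_pos (by omega), if_pos hwx]
      · rw [if_neg (by omega), if_neg hwx]
    have hInit : Idp x y n x (PySem.List.pySetD (List.replicate (y - x + 1).toNat (y - x + 2)) 0 0) := by
      refine ⟨hlen0, ?_, ?_, ?_, ?_, ?_⟩
      · rw [hcell x (le_refl x) hxy, if_pos rfl]
      · intro w hw1 hw2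
        rw [hcell w hw1 hw2]
        split_ifs <;> omega
      · intro w hw1 hw2 hlt
        rw [hcell w hw1 hw2] at hlt ⊢
        by_cases hwx : w = x
        · subst hwx
          refine ⟨0, by rw [if_pos rfl]; rfl, rfl⟩
        · rw [if_neg hwx] at hlt
          omega
      · intro w hw1 hw2
        omega
      · intro u w hu1 hu2
        omega
    have hFin := dp_sweep x y n hx hn ((y + 1 - x).toNat) x
      (PySem.List.pySetD (List.replicate (y - x + 1).toNat (y - x + 2)) 0 0) rfl (le_refl x) hInit
    set F := (PySem.List.pyRange x (y + 1) 1).foldl (dpStep x y n)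
      (PySem.List.pySetD (List.replicate (y - x + 1).toNat (y - x + 2)) 0 0) with hF
    obtain ⟨hL, hB, hR, hS, hfin5, hrel6⟩ := hFin
    have key : solution_alt x y n = (if dpA x F y < y - x + 2 then dpA x F y else -1) := by
      unfold solution_alt
      rw [if_neg hyx]
      rfl
    refine ⟨?_, ?_⟩
    · intro d hf
      have hval : dpA x F y = (d : Int) := hfin5 y hxy (by omega) d hf
      have hdb := firstAt_lb x y n hx hn d y hf
      have hcond : dpA x F y < y - x + 2 := by omega
      rw [key, if_pos hcond, hval]
    · intro hno
      have hcond : ¬ dpA x F y < y - x + 2 := by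
        intro hlt
        obtain ⟨d, -, hrk⟩ := hS y hxy (le_refl y) hlt
        exact hno d hrk
      rw [key, if_neg hcond]

-- ===== VERDICT (by name: the statement is the Claim_ definition above) =====
theorem solution_spec : Claim_equal_solution := by
  intro x y n _ hPre
  obtain ⟨hx0, hx1, hy, hn⟩ := hPre
  unfold Spec_solution
  exact goodOut_unique x y n _ _ (A_good x y n hx0 hx1 hy hn) (B_good x y n hx0 hn)
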